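-- pv_equiv track=rewrite | github.com/BartoszGondek/prg-basics | MockTest2/p7.py | f
-- ===== SOURCE A (Python) =====
-- def f(d):
--     in_park = set()
--
--     for reg_num, action in d:
--         if action == "in":
--             in_park.add(reg_num)
--         elif action == "out":
--             in_park.discard(reg_num)
--     return sorted(in_park)
-- ===== SOURCE B (Python) =====
-- def f(d):
--     # Scan the log backwards: the FIRST relevant ('in'/'out') action seen for a
--     # reg_num in reverse order is its final status; later (earlier-in-time)
--     # entries for that reg_num are ignored entirely.
--     result = []
--     decided = set()
--     for reg_num, action in reversed(d):
--         if action in ("in", "out") and reg_num not in decided: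
--             decided.add(reg_num)
--             if action == "in":
--                 result.append(reg_num)
--     return sorted(result)
-- ===== Notes on version B (the rewrite author's own statement) =====
-- stated objective: alternative
-- what changed: B scans the log back-to-front and lets the first relevant action seen (the chronologically last one) decide each car once, skipping all earlier entries for that car, instead of A's forward simulation with a live add/discard set.
import Mathlib
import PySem

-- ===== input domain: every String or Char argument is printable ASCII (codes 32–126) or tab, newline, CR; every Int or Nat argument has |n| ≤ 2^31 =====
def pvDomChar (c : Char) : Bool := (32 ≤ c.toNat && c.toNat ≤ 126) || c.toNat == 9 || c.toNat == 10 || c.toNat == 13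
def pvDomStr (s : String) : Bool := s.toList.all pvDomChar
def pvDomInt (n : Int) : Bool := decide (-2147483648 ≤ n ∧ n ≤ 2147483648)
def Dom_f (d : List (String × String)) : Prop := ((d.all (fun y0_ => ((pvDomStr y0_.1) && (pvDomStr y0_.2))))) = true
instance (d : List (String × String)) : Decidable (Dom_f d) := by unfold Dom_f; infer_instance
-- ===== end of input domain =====

-- B scans the log back-to-front, the first relevant action seen deciding each car once,
-- instead of A's forward simulation with a live add/discard set; alternative decomposition, same cost.

-- ===== PORT A =====
def f (d : List (String × String)) : List String :=
  let in_park : PySem.Set String :=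
    d.foldl (fun s p =>
      if p.2 == "in" then PySem.Set.add s p.1
      else if p.2 == "out" then PySem.Set.discard s p.1
      else s) PySem.Set.empty
  PySem.List.sorted in_park (fun x => x) false

-- ===== PORT B =====
def f_alt (d : List (String × String)) : List String :=
  let st : List String × PySem.Set String :=
    d.reverse.foldl (fun st p =>
      if (p.2 == "in" || p.2 == "out") && !(PySem.Set.contains st.2 p.1) then
        ((if p.2 == "in" then st.1 ++ [p.1] else st.1), PySem.Set.add st.2 p.1)
      else st) ([], PySem.Set.empty)
  PySem.List.sorted st.1 (fun x => x) false

-- ===== PRECONDITION & SPEC =====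
def Spec_f (d : List (String × String)) (out : List String) : Prop := out = f_alt d
instance (d : List (String × String)) (out : List String) : Decidable (Spec_f d out) := by unfold Spec_f; infer_instance

-- ===== CLAIM (what is proved, stated in full; the proofs are below) =====
def Claim_equal_f : Prop := ∀ (d : List (String × String)), Dom_f d → Spec_f d (f d)

-- ===== LEMMAS AND PROOFS =====

-- "the last relevant action for x in d is 'in'" (as seen from the front of l = d.reverse)
def pvStatus (l : List (String × String)) (x : String) (dflt : Prop) : Prop :=
  match l.find? (fun p => p.1 == x && (p.2 == "in" || p.2 == "out")) with
  | some p => p.2 = "in"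
  | none => dflt

-- A's forward fold realises pvStatus over the reversed list.
lemma pvA_mem (d : List (String × String)) (s : PySem.Set String) (x : String) :
    (x ∈ d.foldl (fun s p =>
      if p.2 == "in" then PySem.Set.add s p.1
      else if p.2 == "out" then PySem.Set.discard s p.1
      else s) s) ↔ pvStatus d.reverse x (x ∈ s) := by
  induction d generalizing s with
  | nil => simp [pvStatus]
  | cons p rest ih =>
    simp only [List.foldl_cons, List.reverse_cons]
    rw [ih]
    unfold pvStatus
    rw [List.find?_append]
    cases hfind : rest.reverse.find? (fun p => p.1 == x && (p.2 == "in" || p.2 == "out")) with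
    | some q => simp
    | none =>
      simp only [Option.none_or, List.find?_cons, List.find?_nil]
      by_cases hx : p.1 = x
      · by_cases hin : p.2 = "in"
        · simp [hx, hin, PySem.Set.mem_add]
        · by_cases hout : p.2 = "out"
          · simp [hx, hout, PySem.Set.mem_discard]
          · simp [hx, show (p.2 == "in") = false by simp [hin],
              show (p.2 == "out") = false by simp [hout]]
      · by_cases hin : p.2 = "in"
        · simp [show (p.1 == x) = false by simp [hx], hin, PySem.Set.mem_add, Ne.symm hx]
        · by_cases hout : p.2 = "out"
          · simp [show (p.1 == x) = false by simp [hx], hout,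
              PySem.Set.mem_discard, Ne.symm hx]
          · simp [show (p.1 == x) = false by simp [hx],
              show (p.2 == "in") = false by simp [hin],
              show (p.2 == "out") = false by simp [hout]]

-- A's accumulated set stays Nodup.
lemma pvA_nodup (d : List (String × String)) (s : PySem.Set String) (hs : s.Nodup) :
    (d.foldl (fun s p =>
      if p.2 == "in" then PySem.Set.add s p.1
      else if p.2 == "out" then PySem.Set.discard s p.1
      else s) s).Nodup := by
  induction d generalizing s with
  | nil => exact hs
  | cons p rest ih =>
    simp only [List.foldl_cons]
    split_ifs
    · exact ih _ (PySem.Set.nodup_add s p.1 hs)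
    · exact ih _ (PySem.Set.nodup_discard s p.1 hs)
    · exact ih _ hs

-- B's loop invariant: result is Nodup, every result element is decided, and
-- membership in the result is pvStatus of the remaining (reversed) list.
lemma pvB_inv (l : List (String × String)) (res : List String) (seen : PySem.Set String)
    (hnd : res.Nodup) (hsub : ∀ y ∈ res, y ∈ seen) :
    (l.foldl (fun st p =>
      if (p.2 == "in" || p.2 == "out") && !(PySem.Set.contains st.2 p.1) then
        ((if p.2 == "in" then st.1 ++ [p.1] else st.1), PySem.Set.add st.2 p.1)
      else st) (res, seen)).1.Nodup ∧
    (∀ x, x ∈ (l.foldl (fun st p =>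
      if (p.2 == "in" || p.2 == "out") && !(PySem.Set.contains st.2 p.1) then
        ((if p.2 == "in" then st.1 ++ [p.1] else st.1), PySem.Set.add st.2 p.1)
      else st) (res, seen)).1 ↔ (x ∈ res ∨ (x ∉ seen ∧ pvStatus l x False))) := by
  induction l generalizing res seen with
  | nil => exact ⟨hnd, by simp [pvStatus]⟩
  | cons p rest ih =>
    simp only [List.foldl_cons]
    by_cases hrel : (p.2 = "in" ∨ p.2 = "out")
    · by_cases hseen : p.1 ∈ seen
      · have hcond : ((p.2 == "in" || p.2 == "out") && !(PySem.Set.contains seen p.1)) = false := by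
          rw [(PySem.Set.contains_iff seen p.1).mpr hseen]
          simp
        rw [hcond]
        simp only [Bool.false_eq_true, if_false]
        obtain ⟨h1, h2⟩ := ih res seen hnd hsub
        refine ⟨h1, fun x => ?_⟩
        rw [h2 x]
        unfold pvStatus
        simp only [List.find?_cons]
        by_cases hx : p.1 = x
        · have : (p.1 == x && (p.2 == "in" || p.2 == "out")) = true := by
            rcases hrel with h | h <;> simp [hx, h]
          rw [this]
          subst hx
          constructor
          · rintro (h | ⟨hns, _⟩)
            · exact Or.inl h
            · exact absurd hseen hns
          · rintro (h | ⟨hns, _⟩)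
            · exact Or.inl h
            · exact absurd hseen hns
        · have : (p.1 == x && (p.2 == "in" || p.2 == "out")) = false := by simp [hx]
          rw [this]
      · have hc0 : PySem.Set.contains seen p.1 = false := by
          rw [Bool.eq_false_iff]; intro h; exact hseen ((PySem.Set.contains_iff seen p.1).mp h)
        have hcond : ((p.2 == "in" || p.2 == "out") && !(PySem.Set.contains seen p.1)) = true := by
          rw [hc0]; rcases hrel with h | h <;> simp [h]
        rw [hcond]
        simp only [if_true]
        have hnd' : (if p.2 == "in" then res ++ [p.1] else res).Nodup := by
          split_ifs
          · refine hnd.append (List.nodup_singleton _) ?_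
            intro y hy hz
            simp only [List.mem_singleton] at hz
            exact hseen (hz ▸ hsub y hy)
          · exact hnd
        have hsub' : ∀ y ∈ (if p.2 == "in" then res ++ [p.1] else res), y ∈ PySem.Set.add seen p.1 := by
          intro y hy
          rw [PySem.Set.mem_add]
          split_ifs at hy with h
          · rcases List.mem_append.mp hy with h' | h'
            · exact Or.inl (hsub y h')
            · simp at h'; exact Or.inr h'
          · exact Or.inl (hsub y hy)
        obtain ⟨h1, h2⟩ := ih _ _ hnd' hsub'
        refine ⟨h1, fun x => ?_⟩
        rw [h2 x]
        unfold pvStatus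
        simp only [List.find?_cons]
        by_cases hx : p.1 = x
        · have : (p.1 == x && (p.2 == "in" || p.2 == "out")) = true := by
            rcases hrel with h | h <;> simp [hx, h]
          rw [this]
          subst hx
          constructor
          · rintro (h | ⟨hns, _⟩)
            · split_ifs at h with hin
              · rcases List.mem_append.mp h with h' | h'
                · exact Or.inl h'
                · exact Or.inr ⟨hseen, by simpa using hin⟩
              · exact Or.inl h
            · rw [PySem.Set.mem_add] at hns; push_neg at hns; exact absurd rfl hns.2
          · rintro (h | ⟨hns, hin⟩)
            · left; split_ifs <;> simp [h]
            · left
              have hin' : (p.2 == "in") = true := by simpa using hin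
              rw [hin']; simp
        · have : (p.1 == x && (p.2 == "in" || p.2 == "out")) = false := by simp [hx]
          rw [this]
          constructor
          · rintro (h | ⟨hns, hst⟩)
            · split_ifs at h with hin
              · rcases List.mem_append.mp h with h' | h'
                · exact Or.inl h'
                · simp at h'; exact absurd h'.symm hx
              · exact Or.inl h
            · rw [PySem.Set.mem_add] at hns; push_neg at hns
              exact Or.inr ⟨hns.1, hst⟩
          · rintro (h | ⟨hns, hst⟩)
            · left; split_ifs <;> simp [h]
            · right
              refine ⟨?_, hst⟩
              rw [PySem.Set.mem_add]; push_neg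
              exact ⟨hns, fun h => hx h.symm⟩
    · have hcond : ((p.2 == "in" || p.2 == "out") && !(PySem.Set.contains seen p.1)) = false := by
        push_neg at hrel; simp [hrel.1, hrel.2]
      rw [hcond]
      simp only [Bool.false_eq_true, if_false]
      obtain ⟨h1, h2⟩ := ih res seen hnd hsub
      refine ⟨h1, fun x => ?_⟩
      rw [h2 x]
      unfold pvStatus
      push_neg at hrel
      simp only [List.find?_cons, show (p.1 == x && (p.2 == "in" || p.2 == "out")) = false by
        simp [hrel.1, hrel.2]]

-- ===== VERDICT (by name: the statement is the Claim_ definition above) =====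
theorem f_spec : Claim_equal_f := by
  intro d _
  unfold Spec_f f f_alt
  obtain ⟨hndB, hmemB⟩ := pvB_inv d.reverse [] PySem.Set.empty List.nodup_nil (by simp [PySem.Set.empty])
  apply PySem.List.sorted_eq_sorted_of_perm _ _ _ (fun a b hab => hab)
  rw [List.perm_ext_iff_of_nodup (pvA_nodup d PySem.Set.empty List.nodup_nil) hndB]
  intro x
  rw [pvA_mem d PySem.Set.empty x, hmemB x]
  cases hf : d.reverse.find? (fun p => p.1 == x && (p.2 == "in" || p.2 == "out")) <;>
    simp [pvStatus, hf, PySem.Set.empty]
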